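-- pv_equiv track=rewrite | github.com/kurosiro2/n-gram | statistics/ngram/det_next_pairs.py | filter_seqs_by_year
-- ===== SOURCE A (Python) =====
-- def filter_seqs_by_year(seqs_dict, year=None):
--     if year is None:
--         return seqs_dict
--     start = year * 10000 + 101
--     end   = year * 10000 + 1231
--     out = {}
--     for k, seq in seqs_dict.items():
--         sub = [(d, s) for (d, s) in seq if start <= d <= end]
--         if sub:
--             sub.sort(key=lambda x: x[0])
--             out[k] = sub
--     return out
-- ===== SOURCE B (Python) =====
-- from itertools import dropwhile, takewhile
--
--
-- def filter_seqs_by_year(seqs_dict, year=None):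
--     if year is None:
--         return seqs_dict
--     start = year * 10000 + 101
--     end = year * 10000 + 1231
--     trimmed = ((k, list(takewhile(lambda p: p[0] <= end,
--                                   dropwhile(lambda p: p[0] < start,
--                                             sorted(seq, key=lambda p: p[0])))))
--                for k, seq in seqs_dict.items())
--     return {k: sub for k, sub in trimmed if sub}
-- ===== Notes on version B (the rewrite author's own statement) =====
-- stated objective: alternative
-- what changed: B sorts each whole sequence once and extracts the in-range window by stripping the out-of-range prefix/suffix with dropwhile/takewhile, assembling the result through a map-then-filter pipeline instead of A's per-element filter-then-sort accumulating loop.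
import Mathlib
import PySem

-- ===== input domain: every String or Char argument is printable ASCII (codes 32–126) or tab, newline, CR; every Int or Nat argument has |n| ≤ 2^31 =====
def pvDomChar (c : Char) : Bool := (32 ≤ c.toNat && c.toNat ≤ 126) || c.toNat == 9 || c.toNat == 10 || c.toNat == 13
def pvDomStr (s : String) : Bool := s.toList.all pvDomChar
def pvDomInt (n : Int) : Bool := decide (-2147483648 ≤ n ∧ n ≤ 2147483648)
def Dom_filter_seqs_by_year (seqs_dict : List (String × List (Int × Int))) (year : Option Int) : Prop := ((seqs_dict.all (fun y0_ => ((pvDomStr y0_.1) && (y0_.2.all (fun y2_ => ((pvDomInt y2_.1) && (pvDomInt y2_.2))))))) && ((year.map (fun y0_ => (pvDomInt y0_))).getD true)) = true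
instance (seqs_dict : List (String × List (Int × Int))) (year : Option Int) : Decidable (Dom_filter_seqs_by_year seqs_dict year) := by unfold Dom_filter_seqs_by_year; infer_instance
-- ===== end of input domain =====

-- B sorts each whole sequence once, strips the out-of-range ends with dropwhile/takewhile, and builds the
-- result via a map-then-filter pipeline instead of A's per-element filter-then-sort accumulating loop (alternative).

-- ===== PORT A =====
-- Port of A: per key, filter the pairs to the year's date range, sort the survivors by date, keep non-empty.
def filter_seqs_by_year (seqs_dict : List (String × List (Int × Int))) (year : Option Int) : List (String × List (Int × Int)) :=
  match year with
  | none => seqs_dict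
  | some y =>
    let start := y * 10000 + 101
    let stop := y * 10000 + 1231
    (seqs_dict.foldl (fun (out : PySem.Dict String (List (Int × Int))) kv =>
        let sub := kv.2.filter (fun p => decide (start ≤ p.1) && decide (p.1 ≤ stop))
        if sub ≠ [] then out.insert kv.1 (PySem.List.sorted sub (fun x => x.1)) else out)
      (PySem.Dict.mk ([] : List (String × List (Int × Int))))).items

-- ===== PORT B =====
-- Port of B's window: stable-sort the whole sequence by date, then dropwhile(< start) and takewhile(≤ stop).
def pvWindow (start stop : Int) (seq : List (Int × Int)) : List (Int × Int) :=
  ((PySem.List.sorted seq (fun p => p.1)).dropWhile (fun p => decide (p.1 < start))).takeWhile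
    (fun p => decide (p.1 ≤ stop))

-- Port of B: map the window over all items, then a dict comprehension keeping the non-empty ones.
def filter_seqs_by_year_alt (seqs_dict : List (String × List (Int × Int))) (year : Option Int) : List (String × List (Int × Int)) :=
  match year with
  | none => seqs_dict
  | some y =>
    let trimmed := seqs_dict.map (fun kv => (kv.1, pvWindow (y * 10000 + 101) (y * 10000 + 1231) kv.2))
    ((trimmed.filter (fun kv => !kv.2.isEmpty)).foldl
        (fun (d : PySem.Dict String (List (Int × Int))) kv => d.insert kv.1 kv.2)
      (PySem.Dict.mk ([] : List (String × List (Int × Int))))).items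

-- ===== PRECONDITION & SPEC =====
def Spec_filter_seqs_by_year (seqs_dict : List (String × List (Int × Int))) (year : Option Int) (out : List (String × List (Int × Int))) : Prop := out = filter_seqs_by_year_alt seqs_dict year
instance (seqs_dict : List (String × List (Int × Int))) (year : Option Int) (out : List (String × List (Int × Int))) : Decidable (Spec_filter_seqs_by_year seqs_dict year out) := by unfold Spec_filter_seqs_by_year; infer_instance

-- ===== CLAIM (what is proved, stated in full; the proofs are below) =====
def Claim_equal_filter_seqs_by_year : Prop := ∀ (seqs_dict : List (String × List (Int × Int))) (year : Option Int), Dom_filter_seqs_by_year seqs_dict year → Spec_filter_seqs_by_year seqs_dict year (filter_seqs_by_year seqs_dict year)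

-- ===== LEMMAS AND PROOFS =====

-- insertBy puts x in front when x's key is below every key of l
theorem insertBy_head (x : Int × Int) (l : List (Int × Int))
    (h : ∀ z ∈ l, x.1 < z.1) :
    PySem.List.insertBy (fun a b => decide (a.1 < b.1)) x l = x :: l := by
  cases l with
  | nil => rfl
  | cons z t => simp [PySem.List.insertBy, h z (List.mem_cons_self)]

-- filtering commutes with a single stable insertion into a key-sorted list
theorem filter_insertBy (p : Int × Int → Bool) (x : Int × Int) :
    ∀ (ys : List (Int × Int)), ys.Pairwise (fun u v => u.1 ≤ v.1) →
    (PySem.List.insertBy (fun a b => decide (a.1 < b.1)) x ys).filter p =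
      if p x then PySem.List.insertBy (fun a b => decide (a.1 < b.1)) x (ys.filter p)
      else ys.filter p := by
  intro ys
  induction ys with
  | nil => intro _; cases hp : p x <;> simp [PySem.List.insertBy, hp]
  | cons y t ih =>
    intro hs
    rw [List.pairwise_cons] at hs
    by_cases hxy : x.1 < y.1
    · have hall : ∀ z ∈ (y :: t).filter p, x.1 < z.1 := by
        intro z hz
        have hz' := List.mem_of_mem_filter hz
        rcases List.mem_cons.mp hz' with h | h
        · rw [h]; exact hxy
        · exact lt_of_lt_of_le hxy (hs.1 z h)
      have hlhs : PySem.List.insertBy (fun a b => decide (a.1 < b.1)) x (y :: t) =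
          x :: y :: t := by simp [PySem.List.insertBy, hxy]
      cases hp : p x
      · simp [hlhs, List.filter_cons, hp]
      · rw [hlhs, List.filter_cons_of_pos (by simp [hp]), insertBy_head x _ hall]
        simp
    · have hstep : PySem.List.insertBy (fun a b => decide (a.1 < b.1)) x (y :: t) =
          y :: PySem.List.insertBy (fun a b => decide (a.1 < b.1)) x t := by
        simp [PySem.List.insertBy, hxy]
      have hstep2 : ∀ l, PySem.List.insertBy (fun a b => decide (a.1 < b.1)) x (y :: l) =
          y :: PySem.List.insertBy (fun a b => decide (a.1 < b.1)) x l := by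
        intro l; simp [PySem.List.insertBy, hxy]
      rw [hstep]
      cases hp : p x <;> cases hq : p y <;>
        simp [hp, hq, ih hs.2, hstep2]

-- filtering commutes with the stable sort (any predicate)
theorem filter_sorted (p : Int × Int → Bool) (xs : List (Int × Int)) :
    (PySem.List.sorted xs (fun q => q.1)).filter p =
      PySem.List.sorted (xs.filter p) (fun q => q.1) := by
  induction xs using List.reverseRecOn with
  | nil => rfl
  | append_singleton xs x ih =>
    have hsnoc : ∀ (l : List (Int × Int)),
        PySem.List.sorted (l ++ [x]) (fun q => q.1) =
          PySem.List.insertBy (fun a b => decide (a.1 < b.1)) x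
            (PySem.List.sorted l (fun q => q.1)) := by
      intro l
      rw [PySem.List.sorted_eq_foldl_insertBy, PySem.List.sorted_eq_foldl_insertBy,
        List.foldl_append]
      rfl
    rw [hsnoc, filter_insertBy p x _ (PySem.List.sorted_pairwise xs (fun q => q.1)),
      List.filter_append, ih]
    cases hp : p x
    · simp [hp]
    · have hx1 : List.filter p [x] = [x] := by simp [hp]
      rw [hx1, hsnoc]
      simp

-- on a key-sorted list, dropping the < a prefix is the same as filtering to a ≤ key
theorem dropWhile_lt_eq_filter (a : Int) :
    ∀ (l : List (Int × Int)), l.Pairwise (fun u v => u.1 ≤ v.1) →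
    l.dropWhile (fun p => decide (p.1 < a)) = l.filter (fun p => decide (a ≤ p.1)) := by
  intro l
  induction l with
  | nil => intro _; rfl
  | cons x t ih =>
    intro hs
    rw [List.pairwise_cons] at hs
    by_cases hx : x.1 < a
    · rw [List.dropWhile_cons_of_pos (by simpa using hx),
        List.filter_cons_of_neg (by simpa using not_le.mpr hx)]
      exact ih hs.2
    · rw [List.dropWhile_cons_of_neg (by simpa using hx),
        List.filter_cons_of_pos (by simpa using not_lt.mp hx)]
      congr 1
      symm
      rw [List.filter_eq_self]
      intro z hz
      have := hs.1 z hz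
      simp only [decide_eq_true_eq]
      omega
  
-- on a key-sorted list, keeping the ≤ b prefix is the same as filtering to key ≤ b
theorem takeWhile_le_eq_filter (b : Int) :
    ∀ (l : List (Int × Int)), l.Pairwise (fun u v => u.1 ≤ v.1) →
    l.takeWhile (fun p => decide (p.1 ≤ b)) = l.filter (fun p => decide (p.1 ≤ b)) := by
  intro l
  induction l with
  | nil => intro _; rfl
  | cons x t ih =>
    intro hs
    rw [List.pairwise_cons] at hs
    by_cases hx : x.1 ≤ b
    · rw [List.takeWhile_cons_of_pos (by simpa using hx),
        List.filter_cons_of_pos (by simpa using hx)]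
      rw [ih hs.2]
    · rw [List.takeWhile_cons_of_neg (by simpa using hx),
        List.filter_cons_of_neg (by simpa using hx)]
      symm
      rw [List.filter_eq_nil_iff]
      intro z hz
      have := hs.1 z hz
      simp only [decide_eq_true_eq]
      omega

-- the per-sequence core: B's sort-then-strip window equals A's filter-then-sort
theorem window_eq (a b : Int) (seq : List (Int × Int)) :
    pvWindow a b seq =
      PySem.List.sorted (seq.filter (fun q => decide (a ≤ q.1) && decide (q.1 ≤ b))) (fun q => q.1) := by
  unfold pvWindow
  have hpw : (PySem.List.sorted seq (fun p : Int × Int => p.1)).Pairwise (fun u v => u.1 ≤ v.1) :=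
    PySem.List.sorted_pairwise seq (fun p => p.1)
  rw [dropWhile_lt_eq_filter a _ hpw,
    takeWhile_le_eq_filter b _ (List.Pairwise.sublist List.filter_sublist hpw),
    List.filter_filter, filter_sorted]
  congr 1
  apply List.filter_congr
  intro q _
  exact Bool.and_comm _ _

-- folding A's guarded inserts equals folding plain inserts over the pre-filtered mapped list
theorem fold_eq (a b : Int) :
    ∀ (l : List (String × List (Int × Int))) (d : PySem.Dict String (List (Int × Int))),
    l.foldl (fun (out : PySem.Dict String (List (Int × Int))) kv =>
        let sub := kv.2.filter (fun p => decide (a ≤ p.1) && decide (p.1 ≤ b))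
        if sub ≠ [] then out.insert kv.1 (PySem.List.sorted sub (fun x => x.1)) else out) d =
      ((l.map (fun kv => (kv.1, pvWindow a b kv.2))).filter (fun kv => !kv.2.isEmpty)).foldl
        (fun (d : PySem.Dict String (List (Int × Int))) kv => d.insert kv.1 kv.2) d := by
  intro l
  induction l with
  | nil => intro d; rfl
  | cons kv t ih =>
    intro d
    simp only [List.foldl_cons, List.map_cons, List.filter_cons]
    rw [window_eq a b kv.2]
    by_cases h : kv.2.filter (fun p => decide (a ≤ p.1) && decide (p.1 ≤ b)) = []
    · rw [if_neg (by simpa using h)]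
      have : (!(PySem.List.sorted (kv.2.filter (fun p => decide (a ≤ p.1) && decide (p.1 ≤ b)))
          (fun q => q.1)).isEmpty) = false := by
        simp [PySem.List.sorted_eq_nil_iff, h]
      rw [this]
      simp only [Bool.false_eq_true, if_false]
      exact ih d
    · rw [if_pos h]
      have : (!(PySem.List.sorted (kv.2.filter (fun p => decide (a ≤ p.1) && decide (p.1 ≤ b)))
          (fun q => q.1)).isEmpty) = true := by
        simp [PySem.List.sorted_eq_nil_iff, h]
      rw [this]
      simp only [if_true, List.foldl_cons]
      exact ih _

-- ===== VERDICT (by name: the statement is the Claim_ definition above) =====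
theorem filter_seqs_by_year_spec : Claim_equal_filter_seqs_by_year := by
  intro seqs_dict year _
  unfold Spec_filter_seqs_by_year
  cases year with
  | none => simp [filter_seqs_by_year, filter_seqs_by_year_alt]
  | some y =>
    simp only [filter_seqs_by_year, filter_seqs_by_year_alt]
    rw [fold_eq (y * 10000 + 101) (y * 10000 + 1231)]
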